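-- pv_equiv track=rewrite | github.com/charlesliebenberg/triathlon-elo | generate_data/data_analyzer.py | determine_event_importance
-- ===== SOURCE A (Python) =====
-- def determine_event_importance(event_name):
--     """
--     Determine event importance based on its name.
--
--     Args:
--         event_name (str): Event name/title
--
--     Returns:
--         int: Importance level (5=Olympic, 4=World, 3=Major, 2=Regional, 1=Local)
--     """
--     event_name = event_name.lower()
--
--     # Olympic-level events
--     if any(term in event_name for term in ["olympic", "olympics", "world championship"]):
--         return 5
--
--     # World-level events
--     elif any(term in event_name for term in [
--         "world cup", "world series", "world triathlon championship series",
--         "wtcs", "wts", "grand final", "championship final"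
--     ]):
--         return 4
--
--     # Major events
--     elif any(term in event_name for term in [
--         "continental championship", "european championship", "asian championship",
--         "american championship", "oceania championship", "african championship",
--         "ironman", "70.3", "half ironman", "challenge", "super league"
--     ]):
--         return 3
--
--     # Regional events
--     elif any(term in event_name for term in [
--         "national championship", "cup", "series", "continental cup",
--         "european cup", "asian cup", "american cup", "oceania cup", "african cup"
--     ]):
--         return 2
--
--     # Default to local
--     else:
--         return 1
-- ===== SOURCE B (Python) =====
-- # Flat keyword->level table scanned once with a running-max accumulator,
-- # instead of a short-circuiting five-branch if/elif cascade.
-- _IMPORTANCE_TABLE = [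
--     (5, "olympic"), (5, "olympics"), (5, "world championship"),
--     (4, "world cup"), (4, "world series"), (4, "world triathlon championship series"),
--     (4, "wtcs"), (4, "wts"), (4, "grand final"), (4, "championship final"),
--     (3, "continental championship"), (3, "european championship"), (3, "asian championship"),
--     (3, "american championship"), (3, "oceania championship"), (3, "african championship"),
--     (3, "ironman"), (3, "70.3"), (3, "half ironman"), (3, "challenge"), (3, "super league"),
--     (2, "national championship"), (2, "cup"), (2, "series"), (2, "continental cup"),
--     (2, "european cup"), (2, "asian cup"), (2, "american cup"), (2, "oceania cup"),
--     (2, "african cup"),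
-- ]
--
-- def determine_event_importance(event_name):
--     name = event_name.lower()
--     best = 1
--     for level, term in _IMPORTANCE_TABLE:
--         if term in name and best < level:
--             best = level
--     return best
-- ===== Notes on version B (the rewrite author's own statement) =====
-- stated objective: alternative
-- what changed: Replaced the five-branch if/elif cascade of any() scans with a single flat (level, keyword) table traversed once while keeping a running maximum level (default 1).
import Mathlib
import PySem

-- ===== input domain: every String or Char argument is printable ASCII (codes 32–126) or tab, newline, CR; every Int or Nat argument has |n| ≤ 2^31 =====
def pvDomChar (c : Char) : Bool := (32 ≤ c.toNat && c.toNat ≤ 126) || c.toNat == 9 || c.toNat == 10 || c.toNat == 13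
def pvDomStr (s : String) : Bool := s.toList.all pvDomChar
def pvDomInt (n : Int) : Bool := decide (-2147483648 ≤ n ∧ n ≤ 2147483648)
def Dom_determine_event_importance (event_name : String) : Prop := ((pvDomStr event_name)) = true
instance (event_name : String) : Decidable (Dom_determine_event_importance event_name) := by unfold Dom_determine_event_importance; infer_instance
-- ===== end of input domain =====

-- B replaces A's five-branch if/elif cascade by one flat (level, keyword) table scanned
-- once with a running-max accumulator; equivalence: the cascade returns the highest matching tier.

-- ===== PORT A =====
def determine_event_importance (event_name : String) : Int :=
  let event_name := PySem.Str.lower event_name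
  if ["olympic", "olympics", "world championship"].any
      (fun term => PySem.Str.isIn term event_name) then 5
  else if ["world cup", "world series", "world triathlon championship series",
           "wtcs", "wts", "grand final", "championship final"].any
      (fun term => PySem.Str.isIn term event_name) then 4
  else if ["continental championship", "european championship", "asian championship",
           "american championship", "oceania championship", "african championship",
           "ironman", "70.3", "half ironman", "challenge", "super league"].any
      (fun term => PySem.Str.isIn term event_name) then 3
  else if ["national championship", "cup", "series", "continental cup",
           "european cup", "asian cup", "american cup", "oceania cup", "african cup"].any
      (fun term => PySem.Str.isIn term event_name) then 2
  else 1

-- ===== PORT B =====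
def pvImportanceTable : List (Int × String) :=
  [(5, "olympic"), (5, "olympics"), (5, "world championship"),
   (4, "world cup"), (4, "world series"), (4, "world triathlon championship series"),
   (4, "wtcs"), (4, "wts"), (4, "grand final"), (4, "championship final"),
   (3, "continental championship"), (3, "european championship"), (3, "asian championship"),
   (3, "american championship"), (3, "oceania championship"), (3, "african championship"),
   (3, "ironman"), (3, "70.3"), (3, "half ironman"), (3, "challenge"), (3, "super league"),
   (2, "national championship"), (2, "cup"), (2, "series"), (2, "continental cup"),
   (2, "european cup"), (2, "asian cup"), (2, "american cup"), (2, "oceania cup"),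
   (2, "african cup")]

def determine_event_importance_alt (event_name : String) : Int :=
  let name := PySem.Str.lower event_name
  pvImportanceTable.foldl
    (fun best p => if PySem.Str.isIn p.2 name && decide (best < p.1) then p.1 else best) 1

-- ===== PRECONDITION & SPEC =====
def Spec_determine_event_importance (event_name : String) (out : Int) : Prop := out = determine_event_importance_alt event_name
instance (event_name : String) (out : Int) : Decidable (Spec_determine_event_importance event_name out) := by unfold Spec_determine_event_importance; infer_instance

-- ===== CLAIM (what is proved, stated in full; the proofs are below) =====
def Claim_equal_determine_event_importance : Prop := ∀ (event_name : String), Dom_determine_event_importance event_name → Spec_determine_event_importance event_name (determine_event_importance event_name)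

-- ===== LEMMAS AND PROOFS =====

-- One tier of the table: folding the running max over terms all carrying level k.
theorem foldl_tier (name : String) (k : Int) (ts : List String) (b : Int) :
    (ts.map (fun t => ((k : Int), t))).foldl
      (fun best p => if PySem.Str.isIn p.2 name && decide (best < p.1) then p.1 else best) b
    = if ts.any (fun t => PySem.Str.isIn t name) && decide (b < k) then k else b := by
  induction ts generalizing b with
  | nil => simp
  | cons t ts ih =>
    simp only [List.map_cons, List.foldl_cons, List.any_cons, ih]
    rcases Bool.eq_false_or_eq_true (PySem.Str.isIn t name) with h | h <;>
    rcases Bool.eq_false_or_eq_true (decide (b < k)) with hb | hb <;>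
      simp only [h, hb, Bool.false_and, Bool.true_and, Bool.false_or, Bool.true_or,
        if_true, if_false, ite_true, ite_false] <;>
      simp_all <;> omega

theorem determine_event_importance_spec : Claim_equal_determine_event_importance := by
  intro event_name _
  unfold Spec_determine_event_importance determine_event_importance determine_event_importance_alt
  set name := PySem.Str.lower event_name with hn
  have htab : pvImportanceTable =
      (["olympic", "olympics", "world championship"].map (fun t => ((5 : Int), t)))
      ++ (["world cup", "world series", "world triathlon championship series",
           "wtcs", "wts", "grand final", "championship final"].map (fun t => ((4 : Int), t)))
      ++ (["continental championship", "european championship", "asian championship",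
           "american championship", "oceania championship", "african championship",
           "ironman", "70.3", "half ironman", "challenge", "super league"].map (fun t => ((3 : Int), t)))
      ++ (["national championship", "cup", "series", "continental cup",
           "european cup", "asian cup", "american cup", "oceania cup", "african cup"].map (fun t => ((2 : Int), t))) := by
    rfl
  rw [htab]
  simp only [List.foldl_append, foldl_tier]
  cases h5 : (["olympic", "olympics", "world championship"].any
      (fun t => PySem.Str.isIn t name)) <;>
  cases h4 : (["world cup", "world series", "world triathlon championship series",
           "wtcs", "wts", "grand final", "championship final"].any
      (fun t => PySem.Str.isIn t name)) <;>
  cases h3 : (["continental championship", "european championship", "asian championship",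
           "american championship", "oceania championship", "african championship",
           "ironman", "70.3", "half ironman", "challenge", "super league"].any
      (fun t => PySem.Str.isIn t name)) <;>
  cases h2 : (["national championship", "cup", "series", "continental cup",
           "european cup", "asian cup", "american cup", "oceania cup", "african cup"].any
      (fun t => PySem.Str.isIn t name)) <;>
  simp only [h5, h4, h3, h2, Bool.false_and, Bool.true_and] <;> decide
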